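-- pv_equiv track=rewrite | github.com/interactive-cookbook/tagger-parser | data-conversions/reduce_y20_conllu_graphs.py | get_token_head_mapping
-- ===== SOURCE A (Python) =====
-- from collections import defaultdict
--
-- def get_token_head_mapping(reduced_graph, sequences):
--     """
--     Creates a dictionary that maps tokens to heads in order to represent the reduced graph in CoNLL-U format.
--     """
--
--     # Add up the heads of all tokens in a sequence
--     seq2heads = defaultdict(set)
--     for seq in sequences:
--         for child,head in reduced_graph:
--             for s in seq:
--                 if child == s:
--                     seq2heads[tuple(seq)].add(head)
--                 elif head == s:
--                     continue # because usually, the child points to the first token of the head sequence only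
--     token2heads = dict()
--     for seq in seq2heads:
--         for s in seq:
--             token2heads[s] = seq2heads[seq]
--
--     return token2heads
-- ===== SOURCE B (Python) =====
-- from collections import defaultdict
--
-- def get_token_head_mapping(reduced_graph, sequences):
--     """
--     Creates a dictionary that maps tokens to heads in order to represent the reduced graph in CoNLL-U format.
--     """
--     # deduplicate the sequences, keeping first-occurrence order
--     uniq = []
--     seen = set()
--     for seq in sequences:
--         key = tuple(seq)
--         if key not in seen:
--             seen.add(key)
--             uniq.append(seq)
--     # inverted index: token -> indices of the sequences that contain it
--     containing = defaultdict(list)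
--     for i, seq in enumerate(uniq):
--         for s in seq:
--             containing[s].append(i)
--     # one pass over the graph: push each head to every sequence containing its child
--     heads = [set() for _ in uniq]
--     for child, head in reduced_graph:
--         for i in containing.get(child, ()):
--             heads[i].add(head)
--     # expand the per-sequence head sets to a per-token mapping
--     token2heads = {}
--     for i, seq in enumerate(uniq):
--         if heads[i]:
--             for s in seq:
--                 token2heads[s] = heads[i]
--     return token2heads
-- ===== Notes on version B (the rewrite author's own statement) =====
-- stated objective: faster
-- what changed: A scans the whole graph once per sequence with an inner per-token scan (quadruple nested loop, then re-expands a tuple-keyed dict); B inverts the iteration: it deduplicates the sequences, builds an inverted index token->sequence-indices in one pass over the tokens, then makes a single pass over the graph edges pushing each head into the head set of exactly the sequences containing its child, and finally expands per token.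
import Mathlib
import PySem

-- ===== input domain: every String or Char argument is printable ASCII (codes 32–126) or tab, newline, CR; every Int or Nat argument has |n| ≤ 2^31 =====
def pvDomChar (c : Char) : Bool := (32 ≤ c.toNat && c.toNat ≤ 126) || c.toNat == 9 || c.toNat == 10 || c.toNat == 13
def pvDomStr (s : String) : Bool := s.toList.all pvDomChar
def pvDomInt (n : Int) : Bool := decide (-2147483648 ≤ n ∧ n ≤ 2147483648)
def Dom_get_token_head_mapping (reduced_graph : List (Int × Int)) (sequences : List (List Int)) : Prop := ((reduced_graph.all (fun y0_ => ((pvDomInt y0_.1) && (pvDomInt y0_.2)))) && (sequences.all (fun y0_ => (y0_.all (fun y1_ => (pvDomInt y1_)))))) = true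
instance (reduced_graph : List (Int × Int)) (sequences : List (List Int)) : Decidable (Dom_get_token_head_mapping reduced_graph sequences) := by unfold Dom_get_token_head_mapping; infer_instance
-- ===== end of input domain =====

-- B inverts A's iteration: instead of scanning the whole graph once per sequence with an
-- inner per-token scan, it builds an inverted index token -> sequence-indices once and then
-- makes a single pass over the graph edges; objective: faster (asymptotic).

-- ===== PORT A =====
def get_token_head_mapping (reduced_graph : List (Int × Int)) (sequences : List (List Int)) : List (Int × List Int) :=
  -- seq2heads = defaultdict(set); for seq: for child,head: for s in seq: …
  let seq2heads : PySem.Dict (List Int) (List Int) :=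
    sequences.foldl (fun d seq =>
      reduced_graph.foldl (fun d ch =>
        seq.foldl (fun d s =>
          if ch.1 == s then d.insert seq (PySem.Set.add (d.getD seq []) ch.2)
          else if ch.2 == s then d  -- 'continue'
          else d) d) d) PySem.Dict.empty
  -- token2heads = {}; for seq in seq2heads: for s in seq: token2heads[s] = seq2heads[seq]
  let token2heads : PySem.Dict Int (List Int) :=
    seq2heads.items.foldl (fun t p => p.1.foldl (fun t s => t.insert s p.2) t) PySem.Dict.empty
  token2heads.items

-- ===== PORT B =====
def get_token_head_mapping_alt (reduced_graph : List (Int × Int)) (sequences : List (List Int)) : List (Int × List Int) :=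
  -- uniq, seen: deduplicate the sequences keeping first-occurrence order
  let us : List (List Int) × PySem.Set (List Int) :=
    sequences.foldl (fun us seq =>
      if PySem.Set.contains us.2 seq then us
      else (us.1 ++ [seq], PySem.Set.add us.2 seq)) ([], PySem.Set.empty)
  let uniq := us.1
  -- containing = defaultdict(list); for i, seq in enumerate(uniq): for s in seq: containing[s].append(i)
  let containing : PySem.Dict Int (List Int) :=
    (PySem.List.enumerate uniq).foldl (fun d p =>
      p.2.foldl (fun d s => d.modify s [] (· ++ [p.1])) d) PySem.Dict.empty
  -- heads = [set() for _ in uniq]; for child, head in reduced_graph: for i in containing.get(child, ()): heads[i].add(head)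
  -- (the indices i produced by enumerate are 0 ≤ i < len(uniq), so i.toNat is Python's heads[i] exactly)
  let heads : List (PySem.Set Int) :=
    reduced_graph.foldl (fun hs ch =>
      (containing.getD ch.1 []).foldl (fun hs i =>
        hs.set i.toNat (PySem.Set.add (hs.getD i.toNat []) ch.2)) hs)
      (List.replicate uniq.length [])
  -- token2heads = {}; for i, seq in enumerate(uniq): if heads[i]: for s in seq: token2heads[s] = heads[i]
  let token2heads : PySem.Dict Int (List Int) :=
    (PySem.List.enumerate uniq).foldl (fun t p =>
      if heads.getD p.1.toNat [] ≠ [] then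
        p.2.foldl (fun t s => t.insert s (heads.getD p.1.toNat [])) t
      else t) PySem.Dict.empty
  token2heads.items

-- ===== PRECONDITION & SPEC =====
def Spec_get_token_head_mapping (reduced_graph : List (Int × Int)) (sequences : List (List Int)) (out : List (Int × List Int)) : Prop := out = get_token_head_mapping_alt reduced_graph sequences
instance (reduced_graph : List (Int × Int)) (sequences : List (List Int)) (out : List (Int × List Int)) : Decidable (Spec_get_token_head_mapping reduced_graph sequences out) := by unfold Spec_get_token_head_mapping; infer_instance

-- ===== CLAIM (what is proved, stated in full; the proofs are below) =====
def Claim_equal_get_token_head_mapping : Prop := ∀ (reduced_graph : List (Int × Int)) (sequences : List (List Int)), Dom_get_token_head_mapping reduced_graph sequences → Spec_get_token_head_mapping reduced_graph sequences (get_token_head_mapping reduced_graph sequences)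

-- ===== LEMMAS AND PROOFS =====

-- pvHfrom g seq s0: the heads of edges whose child lies in seq, added (set-add) to s0 in graph order
def pvHfrom (g : List (Int × Int)) (seq : List Int) (s0 : List Int) : List Int :=
  g.foldl (fun hs ch => if ch.1 ∈ seq then PySem.Set.add hs ch.2 else hs) s0

def pvH (g : List (Int × Int)) (seq : List Int) : List Int := pvHfrom g seq []

def pvG (g : List (Int × Int)) (d : PySem.Dict (List Int) (List Int)) (seq : List Int) : PySem.Dict (List Int) (List Int) :=
  if g.any (fun ch => decide (ch.1 ∈ seq)) then d.insert seq (pvHfrom g seq (d.getD seq [])) else d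

def pvPhase2 (d : PySem.Dict (List Int) (List Int)) : PySem.Dict Int (List Int) :=
  d.items.foldl (fun t p => p.1.foldl (fun t s => t.insert s p.2) t) PySem.Dict.empty

-- A's inner token loop (with the branch condition already in propositional form)
lemma pv_inner (l : List Int) (seq : List Int) (d : PySem.Dict (List Int) (List Int)) (c h : Int) :
    l.foldl (fun d s =>
        if c = s then d.insert seq (PySem.Set.add (d.getD seq []) h) else d) d
    = if c ∈ l then d.insert seq (PySem.Set.add (d.getD seq []) h) else d := by
  induction l generalizing d with
  | nil => simp
  | cons s l ih =>
    simp only [List.foldl_cons]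
    by_cases hc : c = s
    · subst hc
      rw [if_pos rfl]
      rw [ih]
      by_cases hm : c ∈ l
      · simp only [if_pos hm, List.mem_cons, true_or, if_pos]
        rw [PySem.Dict.getD_insert_self]
        have h2 : PySem.Set.add (PySem.Set.add (d.getD seq []) h) h
            = PySem.Set.add (d.getD seq []) h :=
          PySem.Set.add_of_mem (by simp [PySem.Set.mem_add])
        rw [h2, PySem.Dict.insert_insert_self]
      · simp [hm]
    · rw [if_neg hc, ih]
      simp [List.mem_cons, hc]

lemma pv_hfrom_cons (ch : Int × Int) (g : List (Int × Int)) (seq : List Int) (s0 : List Int) :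
    pvHfrom (ch :: g) seq s0 = pvHfrom g seq (if ch.1 ∈ seq then PySem.Set.add s0 ch.2 else s0) := rfl

-- no matching edge ⇒ pvHfrom is the identity
lemma pv_hfrom_no_match (g : List (Int × Int)) (seq : List Int) (s0 : List Int)
    (h : g.any (fun ch => decide (ch.1 ∈ seq)) = false) : pvHfrom g seq s0 = s0 := by
  induction g generalizing s0 with
  | nil => rfl
  | cons ch g ih =>
    rw [List.any_cons, Bool.or_eq_false_iff] at h
    rw [pv_hfrom_cons, if_neg (of_decide_eq_false h.1)]
    exact ih s0 h.2

-- A's per-sequence graph scan is pvG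
lemma pv_graph_fold (g : List (Int × Int)) (seq : List Int) (d : PySem.Dict (List Int) (List Int)) :
    g.foldl (fun d ch =>
      seq.foldl (fun d s =>
        if ch.1 == s then d.insert seq (PySem.Set.add (d.getD seq []) ch.2)
        else if ch.2 == s then d else d) d) d
    = pvG g d seq := by
  induction g generalizing d with
  | nil => simp [pvG]
  | cons ch g ih =>
    simp only [List.foldl_cons]
    have hfun : (fun (d : PySem.Dict (List Int) (List Int)) s =>
        if ch.1 == s then d.insert seq (PySem.Set.add (d.getD seq []) ch.2)
        else if ch.2 == s then d else d)
        = fun d s => if ch.1 = s then d.insert seq (PySem.Set.add (d.getD seq []) ch.2) else d := by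
      funext d s; simp only [beq_iff_eq, ite_self]
    rw [hfun, pv_inner, ih]
    by_cases hm : ch.1 ∈ seq
    · rw [if_pos hm]
      have hany : ((ch :: g).any fun c => decide (c.1 ∈ seq)) = true := by simp [hm]
      conv_rhs => rw [pvG, if_pos hany, pv_hfrom_cons, if_pos hm]
      rw [pvG]
      by_cases ha : (g.any fun c => decide (c.1 ∈ seq)) = true
      · rw [if_pos ha, PySem.Dict.getD_insert_self, PySem.Dict.insert_insert_self]
      · rw [if_neg ha, pv_hfrom_no_match g seq _ (by simpa using ha)]
    · rw [if_neg hm]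
      have : ((ch :: g).any fun c => decide (c.1 ∈ seq)) = (g.any fun c => decide (c.1 ∈ seq)) := by
        simp [hm]
      conv_rhs => rw [pvG, this, pv_hfrom_cons, if_neg hm]
      rw [pvG]

lemma pv_mem_hfrom_of_mem (g : List (Int × Int)) (seq : List Int) (s0 : List Int) (x : Int)
    (h : x ∈ s0) : x ∈ pvHfrom g seq s0 := by
  induction g generalizing s0 with
  | nil => exact h
  | cons ch g ih =>
    rw [pv_hfrom_cons]
    by_cases hm : ch.1 ∈ seq
    · rw [if_pos hm]; exact ih _ (by rw [PySem.Set.mem_add]; exact Or.inl h)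
    · rw [if_neg hm]; exact ih _ h

lemma pv_mem_hfrom_of_match (g : List (Int × Int)) (seq : List Int) (s0 : List Int)
    (ch : Int × Int) (hg : ch ∈ g) (hm : ch.1 ∈ seq) : ch.2 ∈ pvHfrom g seq s0 := by
  induction g generalizing s0 with
  | nil => cases hg
  | cons e g ih =>
    rw [pv_hfrom_cons]
    rcases List.mem_cons.mp hg with he | ht
    · subst he
      rw [if_pos hm]
      exact pv_mem_hfrom_of_mem g seq _ _ (by rw [PySem.Set.mem_add]; exact Or.inr rfl)
    · exact ih _ ht

lemma pv_hfrom_absorb (g : List (Int × Int)) (seq : List Int) (s0 : List Int)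
    (h : ∀ ch ∈ g, ch.1 ∈ seq → ch.2 ∈ s0) : pvHfrom g seq s0 = s0 := by
  induction g generalizing s0 with
  | nil => rfl
  | cons ch g ih =>
    rw [pv_hfrom_cons]
    by_cases hm : ch.1 ∈ seq
    · rw [if_pos hm, PySem.Set.add_of_mem (h ch (List.mem_cons_self) hm)]
      exact ih _ (fun e he hm' => h e (List.mem_cons_of_mem _ he) hm')
    · rw [if_neg hm]
      exact ih _ (fun e he hm' => h e (List.mem_cons_of_mem _ he) hm')

lemma pv_hfrom_H (g : List (Int × Int)) (seq : List Int) :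
    pvHfrom g seq (pvH g seq) = pvH g seq :=
  pv_hfrom_absorb g seq _ (fun ch hg hm => pv_mem_hfrom_of_match g seq [] ch hg hm)

lemma pv_H_ne_nil_iff (g : List (Int × Int)) (seq : List Int) :
    pvH g seq ≠ [] ↔ (g.any fun c => decide (c.1 ∈ seq)) = true := by
  constructor
  · intro h
    by_contra ha
    exact h (pv_hfrom_no_match g seq [] (by simpa using ha))
  · intro ha
    rcases List.any_eq_true.mp ha with ⟨ch, hg, hm⟩
    exact List.ne_nil_of_mem (pv_mem_hfrom_of_match g seq [] ch hg (of_decide_eq_true hm))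

def pvDA (g : List (Int × Int)) (L : List (List Int)) : PySem.Dict (List Int) (List Int) :=
  L.foldl (pvG g) PySem.Dict.empty

lemma pv_dA_append (g : List (Int × Int)) (L : List (List Int)) (seq : List Int) :
    pvDA g (L ++ [seq]) = pvG g (pvDA g L) seq := by
  simp [pvDA, List.foldl_append]

lemma pv_dA_nodup_aux (g : List (Int × Int)) (L : List (List Int))
    (d : PySem.Dict (List Int) (List Int)) (h : d.keys.Nodup) :
    (L.foldl (pvG g) d).keys.Nodup := by
  induction L generalizing d with
  | nil => exact h
  | cons seq L ih =>
    rw [List.foldl_cons]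
    refine ih _ ?_
    rw [pvG]
    by_cases ha : (g.any fun c => decide (c.1 ∈ seq)) = true
    · rw [if_pos ha]; exact PySem.Dict.nodup_keys_insert _ _ _ h
    · rw [if_neg ha]; exact h

lemma pv_dA_nodup (g : List (Int × Int)) (L : List (List Int)) : (pvDA g L).keys.Nodup :=
  pv_dA_nodup_aux g L _ (by simp [PySem.Dict.keys_empty])

lemma pv_dA_get? (g : List (Int × Int)) (L : List (List Int)) (seq' : List Int) :
    (pvDA g L).get? seq' = if seq' ∈ L ∧ pvH g seq' ≠ [] then some (pvH g seq') else none := by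
  induction L using List.reverseRecOn generalizing seq' with
  | nil => simp [pvDA, PySem.Dict.get?_empty]
  | append_singleton L seq ih =>
    rw [pv_dA_append, pvG]
    by_cases hne : pvH g seq = []
    · rw [if_neg (fun ha => absurd ((pv_H_ne_nil_iff g seq).mpr ha) (not_not_intro hne))]
      rw [ih]
      by_cases h' : seq' = seq
      · subst h'; simp [hne]
      · simp [List.mem_append, h']
    · rw [if_pos ((pv_H_ne_nil_iff g seq).mp hne)]
      have hval : pvHfrom g seq ((pvDA g L).getD seq []) = pvH g seq := by
        rw [PySem.Dict.getD_eq_get?_getD, ih seq]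
        by_cases hmem : seq ∈ L
        · rw [if_pos ⟨hmem, hne⟩]; exact pv_hfrom_H g seq
        · rw [if_neg (by simp [hmem])]; rfl
      rw [hval, PySem.Dict.get?_insert]
      by_cases h' : seq' = seq
      · subst h'; simp [hne]
      · rw [if_neg h', ih]; simp [List.mem_append, h']

lemma pv_G_eq (g : List (Int × Int)) (L : List (List Int)) (seq : List Int) :
    pvG g (pvDA g L) seq
      = if pvH g seq = [] then pvDA g L else (pvDA g L).insert seq (pvH g seq) := by
  rw [pvG]
  by_cases hne : pvH g seq = []
  · rw [if_neg (fun ha => absurd ((pv_H_ne_nil_iff g seq).mpr ha) (not_not_intro hne)), if_pos hne]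
  · rw [if_pos ((pv_H_ne_nil_iff g seq).mp hne), if_neg hne]
    have hval : pvHfrom g seq ((pvDA g L).getD seq []) = pvH g seq := by
      rw [PySem.Dict.getD_eq_get?_getD, pv_dA_get? g L seq]
      by_cases hmem : seq ∈ L
      · rw [if_pos ⟨hmem, hne⟩]; exact pv_hfrom_H g seq
      · rw [if_neg (by simp [hmem])]; rfl
    rw [hval]

lemma pv_insert_self_eq {κ ν : Type} [BEq κ] [LawfulBEq κ] (d : PySem.Dict κ ν) (k : κ) (v : ν)
    (hnd : d.keys.Nodup) (h : d.get? k = some v) : d.insert k v = d := by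
  apply PySem.Dict.ext
  have hc : d.contains k = true := by
    rw [PySem.Dict.contains_eq_isSome_get?, h]; rfl
  rw [PySem.Dict.items_insert_of_contains _ _ hc]
  have : ∀ p ∈ d.items, (if p.1 == k then (k, v) else p) = p := by
    intro p hp
    obtain ⟨pk, pw⟩ := p
    by_cases hk : pk = k
    · subst hk
      have h2 := PySem.Dict.get?_of_mem_items d hp hnd
      rw [h] at h2
      simp_all
    · rw [if_neg (by simp [hk])]
  rw [List.map_congr_left this]; simp

lemma pv_phase2_insert (d : PySem.Dict (List Int) (List Int)) (seq : List Int) (H : List Int)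
    (hc : d.contains seq = false) :
    pvPhase2 (d.insert seq H) = seq.foldl (fun t s => t.insert s H) (pvPhase2 d) := by
  rw [pvPhase2, PySem.Dict.items_insert_of_not_contains _ _ hc, List.foldl_append]
  rfl

-- pvB2: fold over the deduplicated sequences writing each nonempty head set to its tokens
def pvB2 (g : List (Int × Int)) (U : List (List Int)) : PySem.Dict Int (List Int) :=
  U.foldl (fun t seq =>
    if pvH g seq ≠ [] then seq.foldl (fun t s => t.insert s (pvH g seq)) t else t)
    PySem.Dict.empty

lemma pv_B2_append (g : List (Int × Int)) (U : List (List Int)) (seq : List Int) :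
    pvB2 g (U ++ [seq])
      = if pvH g seq ≠ [] then seq.foldl (fun t s => t.insert s (pvH g seq)) (pvB2 g U)
        else pvB2 g U := by
  rw [pvB2, List.foldl_append, List.foldl_cons, List.foldl_nil]
  rfl

-- A's whole computation, characterised
lemma pv_A_eq (g : List (Int × Int)) (L : List (List Int)) :
    pvPhase2 (pvDA g L) = pvB2 g (PySem.Set.ofList L) := by
  induction L using List.reverseRecOn with
  | nil => rfl
  | append_singleton L seq ih =>
    rw [pv_dA_append, pv_G_eq, PySem.Set.ofList_append_singleton]
    by_cases hmem : seq ∈ PySem.Set.ofList L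
    · rw [PySem.Set.add_of_mem hmem]
      have hmemL : seq ∈ L := (PySem.Set.mem_ofList _ _).mp hmem
      by_cases hne : pvH g seq = []
      · rw [if_pos hne]; exact ih
      · rw [if_neg hne,
            pv_insert_self_eq _ _ _ (pv_dA_nodup g L)
              (by rw [pv_dA_get?, if_pos ⟨hmemL, hne⟩])]
        exact ih
    · rw [PySem.Set.add_of_not_mem hmem, pv_B2_append]
      have hmemL : seq ∉ L := fun h => hmem ((PySem.Set.mem_ofList _ _).mpr h)
      by_cases hne : pvH g seq = []
      · rw [if_pos hne, if_neg (not_not_intro hne)]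
        exact ih
      · rw [if_neg hne, if_pos hne]
        have hc : (pvDA g L).contains seq = false := by
          rw [PySem.Dict.contains_eq_isSome_get?, pv_dA_get?, if_neg (fun h => hmemL h.1)]
          rfl
        rw [pv_phase2_insert _ _ _ hc, ih]

-- A's port, characterised: it is pvPhase2 of pvDA
lemma pv_A_items (g : List (Int × Int)) (L : List (List Int)) :
    get_token_head_mapping g L = (pvPhase2 (pvDA g L)).items := by
  unfold get_token_head_mapping
  have hbig : (fun (d : PySem.Dict (List Int) (List Int)) seq =>
      g.foldl (fun d ch =>
        seq.foldl (fun d s =>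
          if ch.1 == s then d.insert seq (PySem.Set.add (d.getD seq []) ch.2)
          else if ch.2 == s then d else d) d) d)
      = pvG g := funext fun d => funext fun seq => pv_graph_fold g seq d
  rw [hbig]
  rfl

-- ===== B-side lemmas =====

-- the uniq/seen loop computes set(sequences) (first occurrences, in order) twice over
lemma pv_uniq_eq (L : List (List Int)) :
    L.foldl (fun (us : List (List Int) × PySem.Set (List Int)) seq =>
      if PySem.Set.contains us.2 seq then us
      else (us.1 ++ [seq], PySem.Set.add us.2 seq)) ([], PySem.Set.empty)
    = (PySem.Set.ofList L, PySem.Set.ofList L) := by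
  induction L using List.reverseRecOn with
  | nil => rfl
  | append_singleton L seq ih =>
    rw [List.foldl_append, ih, List.foldl_cons, List.foldl_nil,
        PySem.Set.ofList_append_singleton]
    by_cases hmem : seq ∈ PySem.Set.ofList L
    · rw [if_pos ((PySem.Set.contains_iff _ _).mpr hmem), PySem.Set.add_of_mem hmem]
    · rw [if_neg (fun hc => hmem ((PySem.Set.contains_iff _ _).mp hc)),
          PySem.Set.add_of_not_mem hmem]

-- the token occurrence list: (token, sequence index) pairs in index-then-position order
def pvPairs (U : List (List Int)) : List (Int × Int) :=
  (PySem.List.enumerate U).flatMap (fun p => p.2.map (fun s => (s, p.1)))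

-- pvIdxs c: the indices of the deduplicated sequences containing c (ascending, with multiplicity)
def pvIdxs (U : List (List Int)) (c : Int) : List Int :=
  ((pvPairs U).filter (fun q => q.1 == c)).map (·.2)

-- names for the two B-side folds (proof-local abbreviations of what the port computes)
def pvContaining (U : List (List Int)) : PySem.Dict Int (List Int) :=
  (PySem.List.enumerate U).foldl (fun d p =>
    p.2.foldl (fun d s => d.modify s [] (· ++ [p.1])) d) PySem.Dict.empty

def pvHeads (g : List (Int × Int)) (U : List (List Int)) : List (List Int) :=
  g.foldl (fun hs ch =>
    ((pvContaining U).getD ch.1 []).foldl (fun hs i =>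
      hs.set i.toNat (PySem.Set.add (hs.getD i.toNat []) ch.2)) hs)
    (List.replicate U.length [])

-- the nested containing loop is the flat fold over pvPairs
lemma pv_nested_modify (l : List (Int × List Int)) (d : PySem.Dict Int (List Int)) :
    l.foldl (fun d p => p.2.foldl (fun d s => d.modify s [] (· ++ [p.1])) d) d
    = (l.flatMap (fun p => p.2.map (fun s => (s, p.1)))).foldl
        (fun d q => d.modify q.1 [] (· ++ [q.2])) d := by
  induction l generalizing d with
  | nil => rfl
  | cons p l ih =>
    rw [List.foldl_cons, List.flatMap_cons, List.foldl_append, List.foldl_map, ih]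

lemma pv_containing_getD (U : List (List Int)) (c : Int) :
    (pvContaining U).getD c [] = pvIdxs U c := by
  unfold pvContaining
  rw [pv_nested_modify, PySem.Dict.getD_foldl_modify_append, PySem.Dict.getD_empty]
  simp [pvIdxs, pvPairs]

lemma pv_mem_idxs_iff (U : List (List Int)) (c : Int) (i : Int) :
    i ∈ pvIdxs U c ↔ ∃ (k : Nat) (hk : k < U.length), i = (k : Int) ∧ c ∈ U[k] := by
  constructor
  · intro h
    rcases List.mem_map.mp h with ⟨q, hq, hqi⟩
    rcases List.mem_filter.mp hq with ⟨hqp, hqc⟩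
    rcases List.mem_flatMap.mp hqp with ⟨p, hp, hqmem⟩
    rcases (PySem.List.mem_enumerate_iff _ _ _).mp hp with ⟨k, hk, hpk⟩
    rcases List.mem_map.mp hqmem with ⟨s, hs, hsq⟩
    refine ⟨k, hk, ?_, ?_⟩
    · rw [← hqi, ← hsq, hpk]; simp
    · have : q.1 = c := by simpa using hqc
      have hs1 : s = c := by rw [← hsq] at this; simpa using this
      subst hs1
      have : p.2 = U[k] := by rw [hpk]
      rwa [this] at hs
  · rintro ⟨k, hk, rfl, hc⟩
    refine List.mem_map.mpr ⟨(c, (k : Int)), List.mem_filter.mpr ⟨?_, by simp⟩, rfl⟩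
    refine List.mem_flatMap.mpr ⟨((k : Int), U[k]), ?_, List.mem_map.mpr ⟨c, hc, rfl⟩⟩
    exact (PySem.List.mem_enumerate_iff _ _ _).mpr ⟨k, hk, by simp⟩

lemma pv_idxs_nonneg (U : List (List Int)) (c : Int) (i : Int) (h : i ∈ pvIdxs U c) : 0 ≤ i := by
  rcases (pv_mem_idxs_iff U c i).mp h with ⟨k, _, rfl, _⟩
  exact Int.natCast_nonneg k

-- the inner index fold: position j gets one set-add iff j occurs in I
lemma pv_idx_fold (I : List Int) (hI : ∀ i ∈ I, 0 ≤ i) (hs : List (List Int)) (h : Int)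
    (j : Nat) (hj : j < hs.length) :
    ((I.foldl (fun hs i =>
        hs.set i.toNat (PySem.Set.add (hs.getD i.toNat []) h)) hs).getD j []
      = if (j : Int) ∈ I then PySem.Set.add (hs.getD j []) h else hs.getD j [])
    ∧ (I.foldl (fun hs i =>
        hs.set i.toNat (PySem.Set.add (hs.getD i.toNat []) h)) hs).length = hs.length := by
  induction I generalizing hs with
  | nil => simp
  | cons i I ih =>
    rw [List.foldl_cons]
    have h0 : 0 ≤ i := hI i List.mem_cons_self
    have hlen : (hs.set i.toNat (PySem.Set.add (hs.getD i.toNat []) h)).length = hs.length := by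
      simp
    obtain ⟨ihv, ihl⟩ := ih (fun x hx => hI x (List.mem_cons_of_mem _ hx))
        (hs.set i.toNat (PySem.Set.add (hs.getD i.toNat []) h)) (by rw [hlen]; exact hj)
    refine ⟨?_, by rw [ihl, hlen]⟩
    rw [ihv]
    by_cases hij : i = (j : Int)
    · have hit : i.toNat = j := by rw [hij]; simp
      have hsj : (hs.set i.toNat (PySem.Set.add (hs.getD i.toNat []) h)).getD j []
          = PySem.Set.add (hs.getD j []) h := by
        rw [hit]
        simp only [List.getD, List.length_set, hj, getElem?_pos, List.getElem_set_self,
          Option.getD_some]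
      rw [hsj]
      by_cases hjm : (j : Int) ∈ I
      · rw [if_pos hjm, if_pos (List.mem_cons.mpr (Or.inr hjm)),
            PySem.Set.add_of_mem (by rw [PySem.Set.mem_add]; exact Or.inr rfl)]
      · rw [if_neg hjm, if_pos (List.mem_cons.mpr (Or.inl hij.symm))]
    · have hit : i.toNat ≠ j := fun he => hij (by rw [← he, Int.toNat_of_nonneg h0])
      have hsj : (hs.set i.toNat (PySem.Set.add (hs.getD i.toNat []) h)).getD j []
          = hs.getD j [] := by
        simp only [List.getD, ne_eq, hit, not_false_eq_true, List.getElem?_set_ne]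
      rw [hsj]
      by_cases hjm : (j : Int) ∈ I
      · rw [if_pos hjm, if_pos (List.mem_cons.mpr (Or.inr hjm))]
      · rw [if_neg hjm, if_neg (fun hc => by
          rcases List.mem_cons.mp hc with hc | hc
          exacts [hij hc.symm, hjm hc])]

-- the single graph pass computes pvH at every position
lemma pv_heads_fold (g : List (Int × Int)) (U : List (List Int)) (hs : List (List Int))
    (hlen : hs.length = U.length) (j : Nat) (hj : j < U.length) :
    ((g.foldl (fun hs ch =>
        (pvIdxs U ch.1).foldl (fun hs i =>
          hs.set i.toNat (PySem.Set.add (hs.getD i.toNat []) ch.2)) hs) hs).getD j []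
      = pvHfrom g (U[j]) (hs.getD j []))
    ∧ (g.foldl (fun hs ch =>
        (pvIdxs U ch.1).foldl (fun hs i =>
          hs.set i.toNat (PySem.Set.add (hs.getD i.toNat []) ch.2)) hs) hs).length = hs.length := by
  induction g generalizing hs with
  | nil => exact ⟨rfl, rfl⟩
  | cons ch g ih =>
    rw [List.foldl_cons]
    have hj' : j < hs.length := by rw [hlen]; exact hj
    obtain ⟨stepv, stepl⟩ :=
      pv_idx_fold (pvIdxs U ch.1) (pv_idxs_nonneg U ch.1) hs ch.2 j hj'
    set hs' := (pvIdxs U ch.1).foldl (fun hs i =>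
        hs.set i.toNat (PySem.Set.add (hs.getD i.toNat []) ch.2)) hs with hhs'
    obtain ⟨ihv, ihl⟩ := ih hs' (by rw [stepl, hlen])
    refine ⟨?_, by rw [ihl, stepl]⟩
    rw [ihv, pv_hfrom_cons, stepv]
    by_cases hm : ch.1 ∈ U[j]
    · rw [if_pos ((pv_mem_idxs_iff U ch.1 (j : Int)).mpr ⟨j, hj, rfl, hm⟩), if_pos hm]
    · rw [if_neg (fun hc => by
          rcases (pv_mem_idxs_iff U ch.1 (j : Int)).mp hc with ⟨k, hk, hkj, hck⟩
          have : k = j := by exact_mod_cast hkj.symm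
          subst this
          exact hm hck), if_neg hm]

lemma pv_heads_getD (g : List (Int × Int)) (U : List (List Int)) (j : Nat) (hj : j < U.length) :
    (pvHeads g U).getD j [] = pvH g (U[j]) := by
  unfold pvHeads
  rw [PySem.List.foldl_congr_mem g
      (fun hs ch => ((pvContaining U).getD ch.1 []).foldl (fun hs i =>
        hs.set i.toNat (PySem.Set.add (hs.getD i.toNat []) ch.2)) hs)
      (fun hs ch => (pvIdxs U ch.1).foldl (fun hs i =>
        hs.set i.toNat (PySem.Set.add (hs.getD i.toNat []) ch.2)) hs)
      (List.replicate U.length [])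
      (fun hs ch _ => by simp only [pv_containing_getD])]
  rw [(pv_heads_fold g U (List.replicate U.length []) (by simp) j hj).1]
  have hrep : (List.replicate U.length ([] : List Int)).getD j [] = [] := by
    simp [List.getD, hj]
  rw [hrep]
  rfl

-- fold over enumerate with an index-free body is fold over the list
lemma pv_foldl_enumerate {β : Type} (U : List (List Int)) (f : β → List Int → β) (t : β) :
    (PySem.List.enumerate U).foldl (fun t p => f t p.2) t = U.foldl f t := by
  conv_rhs => rw [← PySem.List.map_snd_enumerate U 0, List.foldl_map]

-- B's final loop over enumerate(uniq) is pvB2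
lemma pv_B_core (g : List (Int × Int)) (U : List (List Int)) :
    (PySem.List.enumerate U).foldl (fun t p =>
      if (pvHeads g U).getD p.1.toNat [] ≠ [] then
        p.2.foldl (fun t s => t.insert s ((pvHeads g U).getD p.1.toNat [])) t
      else t) PySem.Dict.empty
    = pvB2 g U := by
  refine Eq.trans (PySem.List.foldl_congr_mem (PySem.List.enumerate U) _
    (fun t p => if pvH g p.2 ≠ [] then p.2.foldl (fun t s => t.insert s (pvH g p.2)) t else t)
    PySem.Dict.empty ?_) ?_
  · intro t p hp
    rcases (PySem.List.mem_enumerate_iff _ _ _).mp hp with ⟨k, hk, hpk⟩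
    have h1 : p.1.toNat = k := by rw [hpk]; simp
    have h2 : p.2 = U[k] := by rw [hpk]
    rw [h1, h2, pv_heads_getD g U k hk]
    simp only [h2]
  · exact (pv_foldl_enumerate U (fun t seq =>
      if pvH g seq ≠ [] then seq.foldl (fun t s => t.insert s (pvH g seq)) t else t)
      PySem.Dict.empty).trans rfl

-- B's port, characterised
lemma pv_B_items (g : List (Int × Int)) (L : List (List Int)) :
    get_token_head_mapping_alt g L = (pvB2 g (PySem.Set.ofList L)).items := by
  unfold get_token_head_mapping_alt
  rw [pv_uniq_eq L]
  exact congrArg PySem.Dict.items (pv_B_core g (PySem.Set.ofList L))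

-- ===== VERDICT (by name: the statement is the Claim_ definition above) =====
theorem get_token_head_mapping_spec : Claim_equal_get_token_head_mapping := by
  intro g seqs _
  unfold Spec_get_token_head_mapping
  rw [pv_A_items, pv_B_items, pv_A_eq]
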